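-- pv_equiv track=rewrite | github.com/Jamesxxs/learning_py | code/Char9/wordPlay.py | is_triple_double
-- ===== SOURCE A (Python) =====
-- def is_triple_double(word):
--     i = 0
--     count = 0
--     while i < len(word)-1:
--         if word[i] == word[i+1]:
--             count += 1
--             if count == 3:
--                 return True
--             i += 2
--         else:
--             i = i+1 - 2*count
--             count =0
--     return False
-- ===== SOURCE B (Python) =====
-- def is_triple_double(word):
--     return any(word[i] == word[i+1] and word[i+2] == word[i+3] and word[i+4] == word[i+5]
--                for i in range(len(word) - 5))
-- ===== Notes on version B (the rewrite author's own statement) =====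
-- stated objective: idiomatic
-- what changed: Replaces the stateful backtracking while-loop (counter plus index reset) with a stateless sliding-window any() that tests each start position with three fixed pair comparisons.
import Mathlib
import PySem

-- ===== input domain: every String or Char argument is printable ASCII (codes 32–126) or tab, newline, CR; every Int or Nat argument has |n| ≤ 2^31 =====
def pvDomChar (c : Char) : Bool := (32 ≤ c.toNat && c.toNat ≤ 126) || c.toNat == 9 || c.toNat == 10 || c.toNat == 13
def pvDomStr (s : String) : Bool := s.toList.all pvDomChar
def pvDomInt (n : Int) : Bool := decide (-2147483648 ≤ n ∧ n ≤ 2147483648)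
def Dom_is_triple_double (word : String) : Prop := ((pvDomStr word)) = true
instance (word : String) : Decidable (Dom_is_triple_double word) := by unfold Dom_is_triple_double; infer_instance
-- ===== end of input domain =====

-- B replaces A's stateful backtracking scan with a stateless sliding-window any() (idiomatic; same cost).

-- ===== PORT A =====
-- literal port of A's while loop; fuel only makes the recursion total (4*len+3 steps provably suffice)
def pvLoopA (word : String) : Nat → Int → Int → Bool
  | 0, _, _ => false
  | fuel+1, i, count =>
    if i < PySem.Str.len word - 1 then
      if PySem.Str.pyGet? word i == PySem.Str.pyGet? word (i+1) then
        if count + 1 == 3 then true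
        else pvLoopA word fuel (i+2) (count+1)
      else pvLoopA word fuel (i+1-2*count) 0
    else false

def is_triple_double (word : String) : Bool := pvLoopA word (4*word.toList.length+3) 0 0

-- ===== PORT B =====
def is_triple_double_alt (word : String) : Bool :=
  (PySem.List.pyRange 0 (PySem.Str.len word - 5) 1).any (fun i =>
    (PySem.Str.pyGet? word i == PySem.Str.pyGet? word (i+1)) &&
    ((PySem.Str.pyGet? word (i+2) == PySem.Str.pyGet? word (i+3)) &&
     (PySem.Str.pyGet? word (i+4) == PySem.Str.pyGet? word (i+5))))

-- ===== PRECONDITION & SPEC =====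
def Spec_is_triple_double (word : String) (out : Bool) : Prop := out = is_triple_double_alt word
instance (word : String) (out : Bool) : Decidable (Spec_is_triple_double word out) := by unfold Spec_is_triple_double; infer_instance

-- ===== CLAIM (what is proved, stated in full; the proofs are below) =====
def Claim_equal_is_triple_double : Prop := ∀ (word : String), Dom_is_triple_double word → Spec_is_triple_double word (is_triple_double word)

-- ===== LEMMAS AND PROOFS =====

-- pair test at Nat position t
def pvPair (word : String) (t : Nat) : Bool :=
  PySem.Str.pyGet? word (t : Int) == PySem.Str.pyGet? word ((t : Int)+1)

-- "some start position ≥ s carries three consecutive doubles", as a recursion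
def pvGood (word : String) (s : Nat) : Bool :=
  if h : s + 5 < word.toList.length then
    (pvPair word s && (pvPair word (s+2) && pvPair word (s+4))) || pvGood word (s+1)
  else false
termination_by word.toList.length - s
decreasing_by
  have hh : word.toList.length = word.length := by simp
  omega

lemma pvGood_false (word : String) (s : Nat) (h : ¬ s + 5 < word.toList.length) :
    pvGood word s = false := by
  rw [pvGood, dif_neg h]

lemma pvGood_unfold (word : String) (s : Nat) (h : s + 5 < word.toList.length) :
    pvGood word s
      = ((pvPair word s && (pvPair word (s+2) && pvPair word (s+4))) || pvGood word (s+1)) := by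
  rw [pvGood, dif_pos h]

lemma pvStrLen (word : String) : PySem.Str.len word = (word.toList.length : Int) := by
  simp [PySem.Str.len_eq]

-- B equals pvGood 0
lemma pvAlt_eq_good (word : String) :
    ∀ k s : Nat, word.toList.length - s = k →
      (PySem.List.pyRange (s : Int) (PySem.Str.len word - 5) 1).any (fun i =>
        (PySem.Str.pyGet? word i == PySem.Str.pyGet? word (i+1)) &&
        ((PySem.Str.pyGet? word (i+2) == PySem.Str.pyGet? word (i+3)) &&
         (PySem.Str.pyGet? word (i+4) == PySem.Str.pyGet? word (i+5))))
      = pvGood word s := by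
  intro k
  induction k with
  | zero =>
    intro s hs
    rw [PySem.List.pyRange_one_eq_nil (by rw [pvStrLen]; omega)]
    rw [pvGood_false word s (by omega)]
    rfl
  | succ k ih =>
    intro s hs
    by_cases h : s + 5 < word.toList.length
    · rw [PySem.List.pyRange_one_cons (by rw [pvStrLen]; omega)]
      rw [pvGood_unfold word s h]
      have hrest := ih (s+1) (by omega)
      rw [List.any_cons]
      have hcast : ((s : Int) + 1) = ((s+1 : Nat) : Int) := by push_cast; ring
      rw [hcast, hrest]
      congr 1
    · rw [PySem.List.pyRange_one_eq_nil (by rw [pvStrLen]; omega)]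
      rw [pvGood_false word s h]
      rfl

-- main loop invariant: from state (start s, count c with c matched pairs behind),
-- A's loop computes pvGood s, given enough fuel
lemma pvLoopA_eq_good (word : String) :
    ∀ (fuel s c : Nat), c ≤ 2 → s ≤ word.toList.length →
      (∀ j, j < c → pvPair word (s + 2*j) = true) →
      4*(word.toList.length - s) + 3 ≤ fuel + c →
      pvLoopA word fuel ((s + 2*c : Nat) : Int) (c : Int) = pvGood word s := by
  intro fuel
  induction fuel with
  | zero => intro s c hc hs _ hf; omega
  | succ fuel ih =>
    intro s c hc hs hpairs hf
    set n := word.toList.length with hn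
    rw [pvLoopA]
    by_cases hguard : ((s + 2*c : Nat) : Int) < PySem.Str.len word - 1
    · have hguardN : s + 2*c + 1 < n := by
        rw [pvStrLen] at hguard; omega
      rw [if_pos hguard]
      by_cases hpair : pvPair word (s + 2*c) = true
      · have hpair' : (PySem.Str.pyGet? word ((s + 2*c : Nat) : Int)
            == PySem.Str.pyGet? word (((s + 2*c : Nat) : Int)+1)) = true := hpair
        rw [if_pos hpair']
        by_cases hc2 : c = 2
        · subst hc2
          rw [show ((2:Nat) : Int) + 1 = (3:Int) by norm_num]
          simp only [show ((3:Int) == 3) = true by decide, if_pos]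
          -- goal: true = pvGood word s
          have h5 : s + 5 < n := by omega
          rw [pvGood_unfold word s h5]
          have p0 := hpairs 0 (by omega)
          have p1 := hpairs 1 (by omega)
          simp only [Nat.mul_zero, Nat.add_zero, Nat.mul_one] at p0 p1
          have p2 : pvPair word (s+4) = true := by
            have : s + 2*2 = s + 4 := by omega
            rwa [this] at hpair
          rw [p0, p1, p2]
          rfl
        · have hclt : c < 2 := by omega
          have hne : ((c : Int) + 1 == 3) = false := by
            simp only [beq_eq_false_iff_ne]; omega
          rw [if_neg (by simp [hne])]
          have harg1 : ((s + 2*c : Nat) : Int) + 2 = ((s + 2*(c+1) : Nat) : Int) := by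
            push_cast; ring
          have harg2 : (c : Int) + 1 = ((c+1 : Nat) : Int) := by push_cast; ring
          rw [harg1, harg2]
          apply ih s (c+1) (by omega) hs
          · intro j hj
            by_cases hjc : j < c
            · exact hpairs j hjc
            · have : j = c := by omega
              subst this; exact hpair
          · omega
      · have hpair' : (PySem.Str.pyGet? word ((s + 2*c : Nat) : Int)
            == PySem.Str.pyGet? word (((s + 2*c : Nat) : Int)+1)) = false := by
          simpa [pvPair] using eq_false_of_ne_true hpair
        rw [if_neg (by rw [hpair']; exact Bool.false_ne_true)]
        have harg : ((s + 2*c : Nat) : Int) + 1 - 2*(c : Int) = ((s + 1 + 2*0 : Nat) : Int) := by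
          push_cast; ring
        rw [harg, show ((0:Int) = ((0:Nat) : Int)) by norm_num]
        have hrec := ih (s+1) 0 (by omega) (by omega) (by intro j hj; omega) (by omega)
        rw [hrec]
        -- remains: pvGood word (s+1) = pvGood word s
        by_cases h5 : s + 5 < n
        · rw [pvGood_unfold word s h5]
          have htrip : (pvPair word s && (pvPair word (s+2) && pvPair word (s+4))) = false := by
            interval_cases c
            · simp_all
            · simp_all
            · simp_all
          rw [htrip]
          rfl
        · rw [pvGood_false word s h5, pvGood_false word (s+1) (by omega)]
    · rw [if_neg hguard]
      have : ¬ s + 2*c + 1 < n := by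
        rw [pvStrLen] at hguard; omega
      rw [pvGood_false word s (by omega)]

-- ===== VERDICT (by name: the statement is the Claim_ definition above) =====
theorem is_triple_double_spec : Claim_equal_is_triple_double := by
  intro word _
  show is_triple_double word = is_triple_double_alt word
  have hA : is_triple_double word = pvGood word 0 := by
    have := pvLoopA_eq_good word (4*word.toList.length+3) 0 0 (by omega) (by omega)
      (by intro j hj; omega) (by omega)
    simpa [is_triple_double] using this
  have hB : is_triple_double_alt word = pvGood word 0 := by
    have := pvAlt_eq_good word word.toList.length 0 (by omega)
    simpa [is_triple_double_alt] using this
  rw [hA, hB]
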